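-- pv_equiv track=rewrite | github.com/q-horton/uqcs-codejam | 2022/Shorting Stocks.py | maxLoss
-- ===== SOURCE A (Python) =====
-- def maxLoss(prices):
--     # Write your code here
--     diff = 0
--     for i in range(0,len(prices)):
--         a = prices[i]
--         for j in range(i+1,len(prices)):
--             b = prices[j]
--             if (a-b) > diff:
--                 diff = a-b
--     return diff
-- ===== SOURCE B (Python) =====
-- def maxLoss(prices):
--     # Single pass: track running maximum so far; best drop is runmax - current.
--     if not prices:
--         return 0
--     best = 0
--     run = prices[0]
--     for p in prices[1:]:
--         if run - p > best:
--             best = run - p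
--         if p > run:
--             run = p
--     return best
-- ===== Notes on version B (the rewrite author's own statement) =====
-- stated objective: faster
-- what changed: Replaced the nested all-pairs scan with a single pass that keeps a running maximum and takes the best of runningMax - current and the best so far.
import Mathlib
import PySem

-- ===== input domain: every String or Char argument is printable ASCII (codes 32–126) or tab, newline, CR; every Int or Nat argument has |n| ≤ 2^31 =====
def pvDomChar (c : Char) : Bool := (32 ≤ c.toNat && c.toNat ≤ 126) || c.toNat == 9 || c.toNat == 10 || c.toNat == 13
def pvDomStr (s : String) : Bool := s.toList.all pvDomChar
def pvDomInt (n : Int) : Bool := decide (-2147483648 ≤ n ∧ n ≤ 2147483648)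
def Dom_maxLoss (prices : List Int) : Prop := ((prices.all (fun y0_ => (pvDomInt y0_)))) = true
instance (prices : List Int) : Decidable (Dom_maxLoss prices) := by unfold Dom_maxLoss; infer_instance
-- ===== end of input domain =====

-- B replaces A's nested all-pairs scan by one pass tracking the running maximum: O(n) instead of O(n^2).

-- ===== PORT A =====
-- nested index loops, transliterated with pyRange / pyGetD (indices are always in range, so the default 0 is never used)
def maxLoss (prices : List Int) : Int :=
  (PySem.List.pyRange 0 (PySem.List.len prices) 1).foldl (fun diff i =>
    let a := PySem.List.pyGetD prices i 0
    (PySem.List.pyRange (i + 1) (PySem.List.len prices) 1).foldl (fun d j =>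
      let b := PySem.List.pyGetD prices j 0
      if a - b > d then a - b else d) diff) 0

-- ===== PORT B =====
def maxLoss_alt (prices : List Int) : Int :=
  match prices with
  | [] => 0
  | p0 :: rest =>
    (rest.foldl (fun (s : Int × Int) p =>
      let best := if s.1 - p > s.2 then s.1 - p else s.2
      let run := if p > s.1 then p else s.1
      (run, best)) (p0, 0)).2

-- ===== PRECONDITION & SPEC =====
def Spec_maxLoss (prices : List Int) (out : Int) : Prop := out = maxLoss_alt prices
instance (prices : List Int) (out : Int) : Decidable (Spec_maxLoss prices out) := by unfold Spec_maxLoss; infer_instance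

-- ===== CLAIM (what is proved, stated in full; the proofs are below) =====
def Claim_equal_maxLoss : Prop := ∀ (prices : List Int), Dom_maxLoss prices → Spec_maxLoss prices (maxLoss prices)

-- ===== LEMMAS AND PROOFS =====

-- Structural form of A: for each head a, fold max (a - b) over the tail, then recurse on the tail.
def pvA : List Int → Int → Int
  | [], acc => acc
  | a :: rest, acc => pvA rest (rest.foldl (fun d b => max d (a - b)) acc)

-- Structural form of B: thread (running max, best).
def pvB : List Int → Int → Int → Int
  | [], _, best => best
  | p :: rest, run, best => pvB rest (max run p) (max best (run - p))

-- pulling a max out of the inner fold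
theorem pv_pull (t : List Int) (c : Int) : ∀ acc a,
    t.foldl (fun d b => max d (a - b)) (max acc c)
      = max (t.foldl (fun d b => max d (a - b)) acc) c := by
  induction t with
  | nil => intro acc a; rfl
  | cons x t ih =>
      intro acc a
      simp only [List.foldl_cons]
      rw [show max (max acc c) (a - x) = max (max acc (a - x)) c by omega, ih]

-- two consecutive inner folds over the same tail merge into one with the max of the heads
theorem pv_merge (t : List Int) (a b : Int) : ∀ acc,
    t.foldl (fun d x => max d (b - x)) (t.foldl (fun d x => max d (a - x)) acc)
      = t.foldl (fun d x => max d (max a b - x)) acc := by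
  induction t with
  | nil => intro acc; rfl
  | cons x t ih =>
      intro acc
      simp only [List.foldl_cons]
      rw [pv_pull t (b - x), pv_pull t (a - x), pv_pull t (a - x), ih acc,
        pv_pull t (max a b - x)]
      generalize t.foldl (fun d x => max d (max a b - x)) acc = W
      omega

-- the heart: A's structural form equals B's on any head/accumulator
theorem pv_main (t : List Int) : ∀ a acc, pvA (a :: t) acc = pvB t a acc := by
  induction t with
  | nil => intro a acc; rfl
  | cons b t ih =>
      intro a acc
      show pvA (b :: t) (t.foldl (fun d x => max d (a - x)) (max acc (a - b))) = _
      show pvA t (t.foldl (fun d x => max d (b - x))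
            (t.foldl (fun d x => max d (a - x)) (max acc (a - b)))) = _
      rw [pv_merge t a b (max acc (a - b))]
      exact ih (max a b) (max acc (a - b))

theorem pv_if_max_fun (a : Int) :
    (fun d b => if a - b > d then a - b else d) = (fun d b => max d (a - b)) := by
  funext d b; omega

-- A's port equals pvA
theorem pv_portA_aux (xs : List Int) : ∀ (fuel : Nat) (k : Nat) (acc : Int),
    fuel = xs.length - k →
    (PySem.List.pyRange (k : Int) (PySem.List.len xs) 1).foldl (fun diff i =>
      let a := PySem.List.pyGetD xs i 0
      (PySem.List.pyRange (i + 1) (PySem.List.len xs) 1).foldl (fun d j =>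
        let b := PySem.List.pyGetD xs j 0
        if a - b > d then a - b else d) diff) acc
      = pvA (xs.drop k) acc := by
  intro fuel
  induction fuel with
  | zero =>
      intro k acc h
      have hk : xs.length ≤ k := by omega
      rw [PySem.List.pyRange_one_eq_nil (by simp only [PySem.List.len_eq]; omega),
        List.drop_eq_nil_of_le hk]
      rfl
  | succ n ih =>
      intro k acc h
      have hk : k < xs.length := by omega
      rw [PySem.List.pyRange_one_cons (by simp only [PySem.List.len_eq]; exact_mod_cast hk)]
      simp only [List.foldl_cons]
      have hget : PySem.List.pyGetD xs (k : Int) 0 = xs[k]'hk := by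
        rw [PySem.List.pyGetD_eq_getElem xs 0 (by omega) (by exact_mod_cast hk)]
        simp
      have hdrop : xs.drop k = xs[k]'hk :: xs.drop (k + 1) :=
        List.drop_eq_getElem_cons hk
      have hinner : ∀ (g : Int → Int → Int) (init : Int),
          (PySem.List.pyRange ((k : Int) + 1) (PySem.List.len xs) 1).foldl
            (fun d j => g d (PySem.List.pyGetD xs j 0)) init
            = (xs.drop (k + 1)).foldl g init := by
        intro g init
        have h2 := PySem.List.foldl_pyRange_pyGetD xs 0 g init (a := (k : Int) + 1) (by omega)
        have h3 : ((k : Int) + 1).toNat = k + 1 := by omega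
        rw [h3] at h2
        exact h2
      simp only [hget]
      rw [hinner (fun d b => if xs[k]'hk - b > d then xs[k]'hk - b else d) acc]
      have hcast : ((k : Int) + 1) = ((k + 1 : Nat) : Int) := by push_cast; ring
      rw [hcast, ih (k + 1) _ (by omega), hdrop]
      show pvA (xs.drop (k+1)) _ = pvA (xs.drop (k+1)) _
      rw [pv_if_max_fun]

theorem pv_portA (xs : List Int) : maxLoss xs = pvA xs 0 := by
  have := pv_portA_aux xs (xs.length - 0) 0 0 rfl
  simpa [maxLoss] using this

-- B's port equals pvB
theorem pv_portB_aux (t : List Int) : ∀ run best,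
    (t.foldl (fun (s : Int × Int) p =>
      let b := if s.1 - p > s.2 then s.1 - p else s.2
      let r := if p > s.1 then p else s.1
      (r, b)) (run, best)).2 = pvB t run best := by
  induction t with
  | nil => intro run best; rfl
  | cons p t ih =>
      intro run best
      simp only [List.foldl_cons]
      rw [show (if p > run then p else run) = max run p by omega,
        show (if run - p > best then run - p else best) = max best (run - p) by omega]
      exact ih _ _

-- ===== VERDICT (by name: the statement is the Claim_ definition above) =====
theorem maxLoss_spec : Claim_equal_maxLoss := by
  intro prices _
  show maxLoss prices = maxLoss_alt prices
  rw [pv_portA]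
  cases prices with
  | nil => rfl
  | cons a rest =>
      show pvA (a :: rest) 0 = _
      rw [pv_main rest a 0]
      simp only [maxLoss_alt]
      rw [pv_portB_aux rest a 0]
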